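-- pv_equiv track=rewrite | github.com/pzptz/terrabot | agent.py | extract_origin_location
-- ===== SOURCE A (Python) =====
-- def extract_origin_location(content):
--     """Extract origin location from message content"""
--     content_lower = content.lower()
--
--     # Check for common starting point phrases
--     origin_keywords = [
--         "from ",
--         "starting from ",
--         "leaving from ",
--         "departing from ",
--         "my location is ",
--         "i'm at ",
--         "i am at ",
--         "starting point is ",
--     ]
--
--     for keyword in origin_keywords:
--         if keyword in content_lower:
--             parts = content_lower.split(keyword, 1)
--             if len(parts) > 1:
--                 raw_location = parts[1].strip()
--
--                 # Look for end markers
--                 cutoff_phrases = [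
--                     " to ",
--                     " and ",
--                     " heading ",
--                     " going ",
--                     ". ",
--                     ", ",
--                 ]
--
--                 for phrase in cutoff_phrases:
--                     if phrase in raw_location:
--                         raw_location = raw_location.split(phrase, 1)[0].strip()
--
--                 return raw_location
--
--     # Check if we can find a more general origin hint
--     # This would handle cases like "activities in NYC from Boston"
--     if " from " in content_lower and (
--         " in " in content_lower or " near " in content_lower
--     ):
--         # This is a complex case where we have both destination and origin
--         # First get everything after "from"
--         parts = content_lower.split(" from ", 1)
--         if len(parts) > 1:
--             origin_part = parts[1].strip()
--
--             # Look for end markers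
--             cutoff_phrases = [
--                 " to ",
--                 " and ",
--                 " heading ",
--                 " going ",
--                 ". ",
--                 ", ",
--             ]
--
--             for phrase in cutoff_phrases:
--                 if phrase in origin_part:
--                     origin_part = origin_part.split(phrase, 1)[0].strip()
--
--             return origin_part
--
--     return None
-- ===== SOURCE B (Python) =====
-- def _trim(s, phrases):
--     """Cut s at the first occurrence of each end-marker phrase in turn (recursively)."""
--     if not phrases:
--         return s
--     p = phrases[0]
--     i = s.find(p)
--     return _trim(s[:i].strip() if i >= 0 else s, phrases[1:])
--
--
-- def extract_origin_location(content):
--     """Extract origin location from message content"""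
--     content_lower = content.lower()
--     # "starting from ", "leaving from ", "departing from " and the whole
--     # '" from " plus " in "/" near "' fallback branch of the original are dead
--     # code: each contains "from ", which is checked first — so only these
--     # keywords can ever fire.
--     for keyword in ("from ", "my location is ", "i'm at ", "i am at ",
--                     "starting point is "):
--         i = content_lower.find(keyword)
--         if i >= 0:
--             after = content_lower[i + len(keyword):]
--             return _trim(after.strip(),
--                          (" to ", " and ", " heading ", " going ", ". ", ", "))
--     return None
-- ===== Notes on version B (the rewrite author's own statement) =====
-- stated objective: simpler
-- what changed: B deletes the provably unreachable code (the three keywords containing "from " and the whole second " from "/" in "/" near " branch, all shadowed by the "from " keyword checked first), locates keywords and end markers with find()+one slice instead of membership test plus split, and factors the cutoff trimming into a small recursive helper.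
import Mathlib
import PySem

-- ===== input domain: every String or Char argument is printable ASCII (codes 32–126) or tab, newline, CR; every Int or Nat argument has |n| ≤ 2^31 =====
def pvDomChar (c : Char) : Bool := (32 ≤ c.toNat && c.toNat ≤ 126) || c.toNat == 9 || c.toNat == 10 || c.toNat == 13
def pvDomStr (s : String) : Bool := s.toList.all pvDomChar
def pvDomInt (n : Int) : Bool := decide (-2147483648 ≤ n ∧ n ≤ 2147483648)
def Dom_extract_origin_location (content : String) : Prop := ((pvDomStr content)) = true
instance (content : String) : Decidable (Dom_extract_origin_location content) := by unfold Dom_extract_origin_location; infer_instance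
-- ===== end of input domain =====

-- B removes A's unreachable code (the three keywords containing "from " and the whole second
-- " from "/" in "/" near " branch are shadowed by the "from " keyword checked first) and trims
-- with find() + one slice in a small recursive helper instead of split(): a simpler decomposition.


-- ===== PORT A =====
def pvACutoffs : List String := [" to ", " and ", " heading ", " going ", ". ", ", "]

-- one iteration of A's cutoff loop: raw = raw.split(phrase, 1)[0].strip() if phrase in raw
-- (the .getD defaults are unreachable: the separator is a nonempty literal occurring in r)
def pvATrimStep (r p : String) : String :=
  if PySem.Str.isIn p r then
    PySem.Str.strip (((PySem.Str.splitMax? r p 1).getD []).getD 0 "")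
  else r

def pvATrim (r : String) : String := pvACutoffs.foldl pvATrimStep r

def pvAKeywords : List String :=
  ["from ", "starting from ", "leaving from ", "departing from ",
   "my location is ", "i'm at ", "i am at ", "starting point is "]

-- the 'for keyword in origin_keywords' loop with its early return
def pvALoop (cl : String) : List String → Option String
  | [] => none
  | k :: ks =>
    if PySem.Str.isIn k cl then
      let parts := (PySem.Str.splitMax? cl k 1).getD []
      if 1 < parts.length then
        some (pvATrim (PySem.Str.strip (parts.getD 1 "")))
      else pvALoop cl ks
    else pvALoop cl ks

def extract_origin_location (content : String) : Option String :=
  let cl := PySem.Str.lower content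
  match pvALoop cl pvAKeywords with
  | some r => some r
  | none =>
    if PySem.Str.isIn " from " cl && (PySem.Str.isIn " in " cl || PySem.Str.isIn " near " cl) then
      let parts := (PySem.Str.splitMax? cl " from " 1).getD []
      if 1 < parts.length then some (pvATrim (PySem.Str.strip (parts.getD 1 "")))
      else none
    else none

-- ===== PORT B =====
-- _trim: cut s at the first occurrence of each end-marker phrase in turn, recursively
def pvBTrim : String → List String → String
  | s, [] => s
  | s, p :: ps =>
    let i := PySem.Str.find s p
    pvBTrim (if 0 ≤ i then PySem.Str.strip (PySem.Str.slice s none (some i)) else s) ps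

def pvBKeywords : List String :=
  ["from ", "my location is ", "i'm at ", "i am at ", "starting point is "]

def pvBLoop (cl : String) : List String → Option String
  | [] => none
  | k :: ks =>
    let i := PySem.Str.find cl k
    if 0 ≤ i then
      some (pvBTrim (PySem.Str.strip (PySem.Str.slice cl (some (i + PySem.Str.len k)) none))
        [" to ", " and ", " heading ", " going ", ". ", ", "])
    else pvBLoop cl ks

def extract_origin_location_alt (content : String) : Option String :=
  pvBLoop (PySem.Str.lower content) pvBKeywords

-- ===== PRECONDITION & SPEC =====
def Spec_extract_origin_location (content : String) (out : Option String) : Prop := out = extract_origin_location_alt content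
instance (content : String) (out : Option String) : Decidable (Spec_extract_origin_location content out) := by unfold Spec_extract_origin_location; infer_instance

-- ===== CLAIM (what is proved, stated in full; the proofs are below) =====
def Claim_equal_extract_origin_location : Prop := ∀ (content : String), Dom_extract_origin_location content → Spec_extract_origin_location content (extract_origin_location content)

-- ===== LEMMAS AND PROOFS =====

lemma findGo_shift (sep : List Char) (hs : ¬ sep.isEmpty = true) (l : List Char) : ∀ k : Nat,
    PySem.Chars.find.go sep l k =
      if PySem.Chars.find.go sep l 0 = -1 then -1 else PySem.Chars.find.go sep l 0 + k := by
  induction l with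
  | nil => intro k; simp [PySem.Chars.find.go, hs]
  | cons c rest ih =>
    intro k
    by_cases hp : sep.isPrefixOf (c :: rest)
    · simp [PySem.Chars.find.go, hp]
    · simp only [show ∀ m, PySem.Chars.find.go sep (c :: rest) m = PySem.Chars.find.go sep rest (m+1) by
        intro m; simp [PySem.Chars.find.go, hp]]
      rw [ih (k+1), ih 1]
      have hge : -1 ≤ PySem.Chars.find.go sep rest 0 := by
        have := PySem.Chars.neg_one_le_find rest sep
        simpa [PySem.Chars.find] using this
      by_cases h0 : PySem.Chars.find.go sep rest 0 = -1 <;> simp [h0]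
      rw [if_neg (by omega)]
      omega

lemma goM0 (sep : List Char) : ∀ (fuel : Nat) (l cur acc : _),
    PySem.Chars.splitOnMax.go sep fuel 0 l cur acc = ((cur.reverse ++ l) :: acc).reverse := by
  intro fuel l cur acc
  match fuel, l with
  | 0, l => simp [PySem.Chars.splitOnMax.go]
  | (f+1), [] => simp [PySem.Chars.splitOnMax.go]
  | (f+1), (c :: rest) => simp [PySem.Chars.splitOnMax.go]

lemma go1_spec (sep : List Char) (hs : ¬ sep.isEmpty = true) :
    ∀ (l : List Char) (fuel : Nat) (cur acc : _), l.length < fuel →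
    PySem.Chars.splitOnMax.go sep fuel 1 l cur acc =
      acc.reverse ++
        (if PySem.Chars.find l sep = -1 then [cur.reverse ++ l]
         else [cur.reverse ++ l.take (PySem.Chars.find l sep).toNat,
               l.drop ((PySem.Chars.find l sep).toNat + sep.length)]) := by
  intro l
  induction l with
  | nil =>
    intro fuel cur acc hf
    match fuel, hf with
    | (f+1), _ => simp [PySem.Chars.splitOnMax.go, PySem.Chars.find, PySem.Chars.find.go, hs]
  | cons c rest ih =>
    intro fuel cur acc hf
    match fuel, hf with
    | (f+1), hf' =>
      by_cases hp : sep.isPrefixOf (c :: rest)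
      · have hfind : PySem.Chars.find (c :: rest) sep = 0 := by
          simp [PySem.Chars.find, PySem.Chars.find.go, hp]
        simp only [PySem.Chars.splitOnMax.go, hp, if_pos, hfind]
        rw [goM0]
        simp
      · have hstep : PySem.Chars.splitOnMax.go sep (f+1) 1 (c :: rest) cur acc =
            PySem.Chars.splitOnMax.go sep f 1 rest (c :: cur) acc := by
          simp [PySem.Chars.splitOnMax.go, hp]
        have hfind : PySem.Chars.find (c :: rest) sep =
            (if PySem.Chars.find rest sep = -1 then -1 else PySem.Chars.find rest sep + 1) := by
          simp only [PySem.Chars.find]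
          simp only [show PySem.Chars.find.go sep (c :: rest) 0 = PySem.Chars.find.go sep rest 1 by
            simp [PySem.Chars.find.go, hp]]
          rw [findGo_shift sep hs rest 1]
          simp
        have hge : -1 ≤ PySem.Chars.find rest sep := PySem.Chars.neg_one_le_find rest sep
        rw [hstep, ih f (c :: cur) acc (by simpa using hf'), hfind]
        by_cases h0 : PySem.Chars.find rest sep = -1
        · simp [h0]
        · have hne : ¬(PySem.Chars.find rest sep + 1 = -1) := by omega
          have htn : (PySem.Chars.find rest sep + 1).toNat = (PySem.Chars.find rest sep).toNat + 1 := by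
            omega
          simp [h0, hne, htn, Nat.add_right_comm]

lemma split1 (s sep : List Char) (hs : ¬ sep.isEmpty = true) :
    PySem.Chars.splitOnMax s sep 1 =
      if PySem.Chars.find s sep = -1 then [s]
      else [s.take (PySem.Chars.find s sep).toNat,
            s.drop ((PySem.Chars.find s sep).toNat + sep.length)] := by
  unfold PySem.Chars.splitOnMax
  rw [if_neg (by omega)]
  rw [show Int.toNat 1 = 1 from rfl, go1_spec sep hs s (s.length + 1) [] [] (by omega)]
  simp

lemma pvSplitParts (cl k : String) (hk : ¬ k.toList.isEmpty = true)
    (h : 0 ≤ PySem.Str.find cl k) :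
    ∃ a b : String,
      PySem.Str.splitMax? cl k 1 = some [a, b] ∧
      a.toList = cl.toList.take (PySem.Str.find cl k).toNat ∧
      b.toList = cl.toList.drop ((PySem.Str.find cl k).toNat + k.toList.length) := by
  have hmap := PySem.Str.splitMax?_map cl k 1
  have hfind : ¬ PySem.Chars.find cl.toList k.toList = -1 := by
    have : PySem.Str.find cl k = PySem.Chars.find cl.toList k.toList := by
      simp [PySem.Str.find_eq]
    rw [← this]; omega
  rw [PySem.Chars.splitMax?, if_neg hk, split1 _ _ hk, if_neg hfind] at hmap
  cases hsp : PySem.Str.splitMax? cl k 1 with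
  | none => rw [hsp] at hmap; simp at hmap
  | some L =>
    rw [hsp] at hmap
    simp only [Option.map_some, Option.some_inj] at hmap
    have hfs : PySem.Chars.find cl.toList k.toList = PySem.Str.find cl k := by
      simp [PySem.Str.find_eq]
    match L, hmap with
    | [a, b], hmap =>
      simp only [List.map_cons, List.map_nil, List.cons.injEq, and_true] at hmap
      exact ⟨a, b, rfl, by rw [hmap.1, hfs], by rw [hmap.2, hfs]⟩
    | [], hmap => simp at hmap
    | [a], hmap => simp at hmap
    | (a :: b :: c :: t), hmap => simp at hmap

-- my port helpers copies for scratch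

lemma pvStepEq (p : String) (hp : ¬ p.toList.isEmpty = true) (r : String) :
    pvATrimStep r p =
      (if 0 ≤ PySem.Str.find r p then
        PySem.Str.strip (PySem.Str.slice r none (some (PySem.Str.find r p))) else r) := by
  by_cases h : 0 ≤ PySem.Str.find r p
  · obtain ⟨a, b, hsp, ha, _⟩ := pvSplitParts r p hp h
    have hin : PySem.Str.isIn p r = true :=
      (PySem.Str.isIn_iff_infix p r).mpr ((PySem.Str.find_nonneg_iff r p).mp h)
    rw [pvATrimStep, if_pos hin, if_pos h, hsp]
    congr 1
    apply String.toList_inj.mp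
    simp only [Option.getD_some, List.getD_cons_zero]
    rw [ha, PySem.Str.toList_slice]
    simp only [PySem.Chars.slice_eq_listSlice]
    have hfs : PySem.Chars.find r.toList p.toList = PySem.Str.find r p := by
      simp [PySem.Str.find_eq]
    rw [PySem.List.slice_to _ h]
  · have hni : ¬ p.toList <:+: r.toList := fun hi => h ((PySem.Str.find_nonneg_iff r p).mpr hi)
    have hin : PySem.Str.isIn p r = false := by
      cases hx : PySem.Str.isIn p r
      · rfl
      · exact absurd ((PySem.Str.isIn_iff_infix p r).mp hx) hni
    rw [pvATrimStep, hin, if_neg h]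
    simp

lemma pvTrimEq (ps : List String) (hps : ∀ p ∈ ps, ¬ p.toList.isEmpty = true) :
    ∀ s : String, ps.foldl pvATrimStep s = pvBTrim s ps := by
  induction ps with
  | nil => intro s; simp [pvBTrim]
  | cons p ps ih =>
    intro s
    rw [List.foldl_cons, pvStepEq p (hps p (by simp)) s, pvBTrim]
    exact ih (fun q hq => hps q (by simp [hq])) _

lemma pvPartsLen (cl k : String) (hk : ¬ k.toList.isEmpty = true)
    (hin : PySem.Str.isIn k cl = true) :
    1 < ((PySem.Str.splitMax? cl k 1).getD []).length := by
  have h : 0 ≤ PySem.Str.find cl k :=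
    (PySem.Str.find_nonneg_iff cl k).mpr ((PySem.Str.isIn_iff_infix k cl).mp hin)
  obtain ⟨a, b, hsp, -, -⟩ := pvSplitParts cl k hk h
  rw [hsp]
  simp

lemma pvBranchVal (cl k : String) (hk : ¬ k.toList.isEmpty = true)
    (hin : PySem.Str.isIn k cl = true) :
    pvATrim (PySem.Str.strip (((PySem.Str.splitMax? cl k 1).getD []).getD 1 ""))
      = pvBTrim
          (PySem.Str.strip (PySem.Str.slice cl (some (PySem.Str.find cl k + PySem.Str.len k)) none))
          [" to ", " and ", " heading ", " going ", ". ", ", "] := by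
  have h : 0 ≤ PySem.Str.find cl k :=
    (PySem.Str.find_nonneg_iff cl k).mpr ((PySem.Str.isIn_iff_infix k cl).mp hin)
  obtain ⟨a, b, hsp, -, hb⟩ := pvSplitParts cl k hk h
  have hlist : (((PySem.Str.splitMax? cl k 1).getD []).getD 1 "").toList
      = (PySem.Str.slice cl (some (PySem.Str.find cl k + PySem.Str.len k)) none).toList := by
    rw [hsp]
    simp only [Option.getD_some, List.getD_cons_succ, List.getD_cons_zero]
    rw [hb, PySem.Str.toList_slice]
    simp only [PySem.Chars.slice_eq_listSlice]
    rw [PySem.List.slice_from _ (by have := PySem.Str.len_eq k; omega)]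
    rw [show (PySem.Str.find cl k + PySem.Str.len k).toNat
        = (PySem.Str.find cl k).toNat + k.toList.length from by
      have := PySem.Str.len_eq k; omega]
  have hs : PySem.Str.strip (((PySem.Str.splitMax? cl k 1).getD []).getD 1 "")
      = PySem.Str.strip (PySem.Str.slice cl (some (PySem.Str.find cl k + PySem.Str.len k)) none) :=
    String.toList_inj.mp (by rw [PySem.Str.toList_strip, PySem.Str.toList_strip, hlist])
  rw [pvATrim, pvTrimEq pvACutoffs (by decide), hs,
    show pvACutoffs = [" to ", " and ", " heading ", " going ", ". ", ", "] from rfl]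

lemma pvShadow (cl k : String) (hsub : "from ".toList <:+: k.toList)
    (h : PySem.Str.isIn "from " cl = false) : PySem.Str.isIn k cl = false := by
  have hni : ¬ "from ".toList <:+: cl.toList := by
    intro hi
    rw [(PySem.Str.isIn_iff_infix "from " cl).mpr hi] at h
    cases h
  cases hk : PySem.Str.isIn k cl
  · rfl
  · exact absurd (hsub.trans ((PySem.Str.isIn_iff_infix k cl).mp hk)) hni

lemma pvInFind (cl k : String) (h : PySem.Str.isIn k cl = true) : 0 ≤ PySem.Str.find cl k :=
  (PySem.Str.find_nonneg_iff cl k).mpr ((PySem.Str.isIn_iff_infix k cl).mp h)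

lemma pvNotInFind (cl k : String) (h : PySem.Str.isIn k cl = false) :
    ¬ 0 ≤ PySem.Str.find cl k := by
  intro hge
  rw [(PySem.Str.isIn_iff_infix k cl).mpr ((PySem.Str.find_nonneg_iff cl k).mp hge)] at h
  cases h

lemma pvALoopConsTrue (cl k : String) (ks : List String) (hk : ¬ k.toList.isEmpty = true)
    (h : PySem.Str.isIn k cl = true) :
    pvALoop cl (k :: ks)
      = some (pvATrim (PySem.Str.strip (((PySem.Str.splitMax? cl k 1).getD []).getD 1 ""))) := by
  have hlen := pvPartsLen cl k hk h
  simp only [pvALoop, h, hlen, if_pos]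

lemma pvALoopConsFalse (cl k : String) (ks : List String) (h : PySem.Str.isIn k cl = false) :
    pvALoop cl (k :: ks) = pvALoop cl ks := by
  simp only [pvALoop, h, Bool.false_eq_true, if_false]

lemma pvBLoopConsTrue (cl k : String) (ks : List String) (h : PySem.Str.isIn k cl = true) :
    pvBLoop cl (k :: ks)
      = some (pvBTrim
          (PySem.Str.strip (PySem.Str.slice cl (some (PySem.Str.find cl k + PySem.Str.len k)) none))
          [" to ", " and ", " heading ", " going ", ". ", ", "]) := by
  simp only [pvBLoop]
  rw [if_pos (pvInFind cl k h)]

lemma pvBLoopConsFalse (cl k : String) (ks : List String) (h : PySem.Str.isIn k cl = false) :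
    pvBLoop cl (k :: ks) = pvBLoop cl ks := by
  simp only [pvBLoop]
  rw [if_neg (pvNotInFind cl k h)]

lemma pvMatched (cl k : String) (ks ks' : List String) (hk : ¬ k.toList.isEmpty = true)
    (h : PySem.Str.isIn k cl = true) :
    pvALoop cl (k :: ks) = pvBLoop cl (k :: ks') := by
  rw [pvALoopConsTrue cl k ks hk h, pvBLoopConsTrue cl k ks' h,
    pvBranchVal cl k hk h]

lemma pvMain (content : String) :
    extract_origin_location content = extract_origin_location_alt content := by
  simp only [extract_origin_location, extract_origin_location_alt]
  generalize PySem.Str.lower content = cl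
  cases h1 : PySem.Str.isIn "from " cl
  case true =>
    rw [pvAKeywords, pvBKeywords]
    rw [pvMatched cl "from " _ _ (by decide) h1]
    cases hb : pvBLoop cl ("from " :: _) with
    | none => rw [pvBLoopConsTrue _ _ _ h1] at hb; cases hb
    | some v => simp
  case false =>
    rw [pvAKeywords, pvBKeywords,
      pvALoopConsFalse _ _ _ h1,
      pvALoopConsFalse _ _ _ (pvShadow cl _ (by decide) h1),
      pvALoopConsFalse _ _ _ (pvShadow cl _ (by decide) h1),
      pvALoopConsFalse _ _ _ (pvShadow cl _ (by decide) h1),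
      pvBLoopConsFalse _ _ _ h1]
    cases h2 : PySem.Str.isIn "my location is " cl
    case true =>
      rw [pvMatched cl "my location is " _ _ (by decide) h2]
      cases hb : pvBLoop cl ("my location is " :: _) with
      | none => rw [pvBLoopConsTrue _ _ _ h2] at hb; cases hb
      | some v => simp
    case false =>
      rw [pvALoopConsFalse _ _ _ h2, pvBLoopConsFalse _ _ _ h2]
      cases h3 : PySem.Str.isIn "i'm at " cl
      case true =>
        rw [pvMatched cl "i'm at " _ _ (by decide) h3]
        cases hb : pvBLoop cl ("i'm at " :: _) with
        | none => rw [pvBLoopConsTrue _ _ _ h3] at hb; cases hb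
        | some v => simp
      case false =>
        rw [pvALoopConsFalse _ _ _ h3, pvBLoopConsFalse _ _ _ h3]
        cases h4 : PySem.Str.isIn "i am at " cl
        case true =>
          rw [pvMatched cl "i am at " _ _ (by decide) h4]
          cases hb : pvBLoop cl ("i am at " :: _) with
          | none => rw [pvBLoopConsTrue _ _ _ h4] at hb; cases hb
          | some v => simp
        case false =>
          rw [pvALoopConsFalse _ _ _ h4, pvBLoopConsFalse _ _ _ h4]
          cases h5 : PySem.Str.isIn "starting point is " cl
          case true =>
            rw [pvMatched cl "starting point is " _ _ (by decide) h5]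
            cases hb : pvBLoop cl ("starting point is " :: _) with
            | none => rw [pvBLoopConsTrue _ _ _ h5] at hb; cases hb
            | some v => simp
          case false =>
            rw [pvALoopConsFalse _ _ _ h5, pvBLoopConsFalse _ _ _ h5]
            have hff : PySem.Str.isIn " from " cl = false := pvShadow cl _ (by decide) h1
            have hff' : PySem.Chars.isIn [' ', 'f', 'r', 'o', 'm', ' '] cl.toList = false := by
              simpa using hff
            simp [pvALoop, pvBLoop, hff']

-- ===== VERDICT (by name: the statement is the Claim_ definition above) =====
theorem extract_origin_location_spec : Claim_equal_extract_origin_location := by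
  intro content _
  unfold Spec_extract_origin_location
  exact pvMain content
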